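-- pv_equiv track=rewrite | github.com/daniel-reich/ubiquitous-fiesta | bHfb35MfsjyM6DJge_11.py | route_diff
-- ===== SOURCE A (Python) =====
-- def route_diff(lst):
--   x, y = 0, 0
--   for i in lst:
--       if i == "N":
--           y += 1
--       if i == "S":
--           y -= 1
--       if i == "E":
--           x += 1
--       if i == "W":
--           x -= 1
--   return len(lst) - (abs(x) + abs(y))
-- ===== SOURCE B (Python) =====
-- def route_diff(lst):
--     # Count wasted steps: each N/S (or E/W) pair cancels (2 wasted steps),
--     # and any non-direction entry is wholly wasted.
--     c = {}
--     for i in lst: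
--         c[i] = c.get(i, 0) + 1
--     n = c.get("N", 0)
--     s = c.get("S", 0)
--     e = c.get("E", 0)
--     w = c.get("W", 0)
--     return (len(lst) - n - s - e - w) + 2 * min(n, s) + 2 * min(e, w)
-- ===== Notes on version B (the rewrite author's own statement) =====
-- stated objective: alternative
-- what changed: Instead of accumulating a signed displacement and subtracting its absolute values, B builds a frequency dictionary in one pass and counts wasted steps directly: non-direction entries plus two per cancelled opposite pair (2*min(N,S)+2*min(E,W)).
import Mathlib
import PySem

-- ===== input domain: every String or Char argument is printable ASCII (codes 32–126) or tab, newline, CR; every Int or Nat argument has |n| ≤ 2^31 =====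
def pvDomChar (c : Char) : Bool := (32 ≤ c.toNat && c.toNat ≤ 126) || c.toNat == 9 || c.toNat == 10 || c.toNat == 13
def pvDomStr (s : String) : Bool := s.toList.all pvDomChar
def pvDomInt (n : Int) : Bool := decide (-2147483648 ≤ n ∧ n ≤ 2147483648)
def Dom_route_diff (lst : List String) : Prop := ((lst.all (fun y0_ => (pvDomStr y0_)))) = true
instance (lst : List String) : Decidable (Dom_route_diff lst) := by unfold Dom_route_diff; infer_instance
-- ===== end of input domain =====

-- B counts wasted steps via a frequency dictionary (non-direction entries plus two per
-- cancelled opposite pair) instead of subtracting the absolute displacement (alternative).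

-- ===== PORT A =====
-- the body of A's loop: four successive independent if-tests over the state (x, y)
def pvStepA (p : Int × Int) (i : String) : Int × Int :=
  let p := if i == "N" then (p.1, p.2 + 1) else p
  let p := if i == "S" then (p.1, p.2 - 1) else p
  let p := if i == "E" then (p.1 + 1, p.2) else p
  let p := if i == "W" then (p.1 - 1, p.2) else p
  p

def route_diff (lst : List String) : Int :=
  let p := lst.foldl pvStepA (0, 0)
  (lst.length : Int) - (|p.1| + |p.2|)

-- ===== PORT B =====
def route_diff_alt (lst : List String) : Int :=
  let c := lst.foldl (fun d i => d.insert i (d.getD i 0 + 1)) (PySem.Dict.empty : PySem.Dict String Int)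
  let n := c.getD "N" 0
  let s := c.getD "S" 0
  let e := c.getD "E" 0
  let w := c.getD "W" 0
  ((lst.length : Int) - n - s - e - w) + 2 * min n s + 2 * min e w

-- ===== PRECONDITION & SPEC =====
def Spec_route_diff (lst : List String) (out : Int) : Prop := out = route_diff_alt lst
instance (lst : List String) (out : Int) : Decidable (Spec_route_diff lst out) := by unfold Spec_route_diff; infer_instance

-- ===== CLAIM =====
def Claim_equal_route_diff : Prop := ∀ (lst : List String), Dom_route_diff lst → Spec_route_diff lst (route_diff lst)

-- ===== LEMMAS AND PROOFS =====

theorem pvStepA_eq (x y : Int) (i : String) :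
    pvStepA (x, y) i
    = (x + ([i].count "E" : Int) - ([i].count "W" : Int),
       y + ([i].count "N" : Int) - ([i].count "S" : Int)) := by
  unfold pvStepA
  by_cases hN : i = "N" <;> by_cases hS : i = "S" <;> by_cases hE : i = "E" <;>
    by_cases hW : i = "W" <;> simp_all

theorem pvFoldA (lst : List String) (x0 y0 : Int) :
    lst.foldl pvStepA (x0, y0)
    = (x0 + (lst.count "E" : Int) - (lst.count "W" : Int),
       y0 + (lst.count "N" : Int) - (lst.count "S" : Int)) := by
  induction lst generalizing x0 y0 with
  | nil => simp
  | cons h t ih =>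
    rw [List.foldl_cons, pvStepA_eq, ih]
    simp [List.count_cons]
    constructor <;> split <;> ring

theorem pvCountBound (lst : List String) :
    lst.count "N" + lst.count "S" + lst.count "E" + lst.count "W" ≤ lst.length := by
  induction lst with
  | nil => simp
  | cons h t ih =>
    simp only [List.count_cons, List.length_cons]
    by_cases hN : h = "N" <;> by_cases hS : h = "S" <;> by_cases hE : h = "E" <;>
      by_cases hW : h = "W" <;> simp_all <;> omega

-- ===== VERDICT =====
theorem route_diff_spec : Claim_equal_route_diff := by
  intro lst _
  unfold Spec_route_diff route_diff route_diff_alt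
  rw [pvFoldA, PySem.Dict.foldl_insert_getD_add_one_eq_counter]
  simp only [PySem.Dict.getD_counter]
  have h := pvCountBound lst
  simp only [Int.abs_eq_natAbs]
  omega
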